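-- pv_equiv track=rewrite | github.com/tianhao-stan-wu/CS570-final-project | efficient.py | space_efficient_score
-- ===== SOURCE A (Python) =====
-- delta = 30  # Gap penalty
--
-- alpha = {
--     'A': {'A': 0,   'C': 110, 'G': 48,  'T': 94},
--     'C': {'A': 110, 'C': 0,   'G': 118, 'T': 48},
--     'G': {'A': 48,  'C': 118, 'G': 0,   'T': 110},
--     'T': {'A': 94,  'C': 48,  'G': 110, 'T': 0}
-- }
--
-- def get_mismatch_cost(c1, c2):
--     return alpha[c1][c2]
--
-- def space_efficient_score(seq1, seq2):
--     n = len(seq2)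
--     prev = [j * delta for j in range(n + 1)]
--     curr = [0] * (n + 1)
--
--     for c1 in seq1:
--         curr[0] = prev[0] + delta
--         for j in range(1, n + 1):
--             c2 = seq2[j-1]
--             cost_match = prev[j-1] + get_mismatch_cost(c1, c2)
--             cost_delete = prev[j] + delta
--             cost_insert = curr[j-1] + delta
--             curr[j] = min(cost_match, cost_delete, cost_insert)
--         prev[:] = curr[:]
--
--     return prev
-- ===== SOURCE B (Python) =====
-- delta = 30  # Gap penalty
--
-- alpha = {
--     'A': {'A': 0,   'C': 110, 'G': 48,  'T': 94},
--     'C': {'A': 110, 'C': 0,   'G': 118, 'T': 48},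
--     'G': {'A': 48,  'C': 118, 'G': 0,   'T': 110},
--     'T': {'A': 94,  'C': 48,  'G': 110, 'T': 0}
-- }
--
-- def get_mismatch_cost(c1, c2):
--     return alpha[c1][c2]
--
-- def space_efficient_score(seq1, seq2):
--     # Transposed DP: sweep the table COLUMN by column (outer loop over seq2),
--     # keeping one column indexed by positions of seq1, and harvest the bottom
--     # cell of every column; the final row of the table is exactly that list of
--     # bottom cells, so the result is assembled incrementally instead of being
--     # the last state of a row recurrence.
--     m = len(seq1)
--     col = [i * delta for i in range(m + 1)]
--     out = [col[m]]
--     for c2 in seq2: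
--         new = [col[0] + delta]
--         for i in range(1, m + 1):
--             new.append(min(col[i - 1] + get_mismatch_cost(seq1[i - 1], c2),
--                            col[i] + delta,
--                            new[i - 1] + delta))
--         col = new
--         out.append(col[m])
--     return out
-- ===== Notes on version B (the rewrite author's own statement) =====
-- stated objective: alternative
-- what changed: B sweeps the DP table transposed, column by column over seq2 with a rolling column indexed by seq1, and assembles the answer incrementally from the bottom cell of each column instead of returning the final state of A's row recurrence over seq1.
import Mathlib
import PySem

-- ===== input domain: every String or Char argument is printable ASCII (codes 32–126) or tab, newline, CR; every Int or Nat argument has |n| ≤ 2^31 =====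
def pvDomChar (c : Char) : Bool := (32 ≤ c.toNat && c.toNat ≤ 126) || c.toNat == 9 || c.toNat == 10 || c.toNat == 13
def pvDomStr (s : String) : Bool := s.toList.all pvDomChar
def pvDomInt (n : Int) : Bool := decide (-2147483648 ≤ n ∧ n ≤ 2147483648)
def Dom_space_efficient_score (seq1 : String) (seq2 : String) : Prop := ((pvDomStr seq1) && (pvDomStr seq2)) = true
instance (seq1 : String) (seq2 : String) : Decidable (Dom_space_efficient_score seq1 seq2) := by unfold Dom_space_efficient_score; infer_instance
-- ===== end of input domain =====

-- B computes the same alignment-score vector by a transposed sweep: columns over seq2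
-- (a rolling column indexed by seq1), harvesting the bottom cell of every column,
-- instead of A's row recurrence over seq1 returning the final row.

-- ===== PORT A =====
-- alpha[c1][c2]: exact on Pre_ (both chars in 'ACGT'); Python raises KeyError otherwise,
-- which Pre_space_efficient_score excludes (the 0 default is never reached inside Pre_).
def get_mismatch_cost (c1 : Char) (c2 : Char) : Int :=
  match c1, c2 with
  | 'A', 'A' => 0   | 'A', 'C' => 110 | 'A', 'G' => 48  | 'A', 'T' => 94
  | 'C', 'A' => 110 | 'C', 'C' => 0   | 'C', 'G' => 118 | 'C', 'T' => 48
  | 'G', 'A' => 48  | 'G', 'C' => 118 | 'G', 'G' => 0   | 'G', 'T' => 110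
  | 'T', 'A' => 94  | 'T', 'C' => 48  | 'T', 'G' => 110 | 'T', 'T' => 0
  | _, _ => 0

-- inner loop of A (along one row): state (prev[j-1], prev[j:], remaining seq2 chars, curr[j-1])
def pvInnerA (c1 : Char) : Int → List Int → List Char → Int → List Int
  | _, _, [], _ => []
  | _, [], _, _ => []
  | pprev, p :: ps, c2 :: cs, cur =>
      let v := min (min (pprev + get_mismatch_cost c1 c2) (p + 30)) (cur + 30)
      v :: pvInnerA c1 p ps cs v

def pvStepA (c1 : Char) (prev : List Int) (l2 : List Char) : List Int :=
  match prev with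
  | [] => []
  | p0 :: ps =>
      let c0 := p0 + 30
      c0 :: pvInnerA c1 p0 ps l2 c0

def space_efficient_score (seq1 : String) (seq2 : String) : List Int :=
  let l2 := seq2.toList
  let init := (List.range (l2.length + 1)).map (fun (j : Nat) => (j : Int) * 30)
  seq1.toList.foldl (fun prev c1 => pvStepA c1 prev l2) init

-- ===== PORT B =====
-- inner loop of B (down one column): state (col[i-1], col[i:], remaining seq1 chars, new[i-1])
def pvInnerB (c2 : Char) : Int → List Int → List Char → Int → List Int
  | _, _, [], _ => []
  | _, [], _, _ => []
  | cprev, c :: cs, ch :: chs, cur =>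
      let v := min (min (cprev + get_mismatch_cost ch c2) (c + 30)) (cur + 30)
      v :: pvInnerB c2 c cs chs v

def pvColStep (c2 : Char) (col : List Int) (l1 : List Char) : List Int :=
  match col with
  | [] => []
  | c0 :: cs =>
      let n0 := c0 + 30
      n0 :: pvInnerB c2 c0 cs l1 n0

-- one outer iteration of B: advance the column, append its bottom cell (col'[m]) to out
def pvColOut (l1 : List Char) (st : List Int × List Int) (c2 : Char) : List Int × List Int :=
  let col' := pvColStep c2 st.1 l1
  (col', st.2 ++ [PySem.List.pyGetD col' (l1.length : Int) 0])

def space_efficient_score_alt (seq1 : String) (seq2 : String) : List Int :=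
  let l1 := seq1.toList
  let init := (List.range (l1.length + 1)).map (fun (i : Nat) => (i : Int) * 30)
  (seq2.toList.foldl (pvColOut l1)
    (init, [PySem.List.pyGetD init (l1.length : Int) 0])).2

-- ===== PRECONDITION & SPEC =====
-- Pre_ excludes exactly the inputs on which Python A raises KeyError (a character outside
-- 'ACGT' looked up in alpha, which happens iff both strings are nonempty and some character
-- of either is not in 'ACGT').
def Pre_space_efficient_score (seq1 : String) (seq2 : String) : Prop :=
  seq1 = "" ∨ seq2 = "" ∨
    ((seq1 ++ seq2).toList.all (fun c => c == 'A' || c == 'C' || c == 'G' || c == 'T')) = true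
instance (seq1 : String) (seq2 : String) : Decidable (Pre_space_efficient_score seq1 seq2) := by
  unfold Pre_space_efficient_score; infer_instance

def pvWitness_space_efficient_score : String × String := ("GATC", "ACT")

def Spec_space_efficient_score (seq1 : String) (seq2 : String) (out : List Int) : Prop := out = space_efficient_score_alt seq1 seq2
instance (seq1 : String) (seq2 : String) (out : List Int) : Decidable (Spec_space_efficient_score seq1 seq2 out) := by unfold Spec_space_efficient_score; infer_instance

-- ===== CLAIM (what is proved, stated in full; the proofs are below) =====
def Claim_equal_space_efficient_score : Prop := ∀ (seq1 : String) (seq2 : String), Dom_space_efficient_score seq1 seq2 → Pre_space_efficient_score seq1 seq2 → Spec_space_efficient_score seq1 seq2 (space_efficient_score seq1 seq2)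

-- ===== LEMMAS AND PROOFS =====

-- the DP table both programs traverse: pvD l1 l2 i j = cost of aligning l1[:i] with l2[:j]
def pvD (l1 l2 : List Char) : Nat → Nat → Int
  | 0, j => (j : Int) * 30
  | i+1, 0 => ((i : Int) + 1) * 30
  | i+1, j+1 =>
      min (min (pvD l1 l2 i j + get_mismatch_cost (l1.getD i ' ') (l2.getD j ' '))
               (pvD l1 l2 i (j+1) + 30))
          (pvD l1 l2 (i+1) j + 30)
  termination_by i j => (i, j)

theorem pvD_zero_left (l1 l2 : List Char) (j : Nat) : pvD l1 l2 0 j = (j : Int) * 30 := by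
  simp [pvD]

theorem pvD_zero_right (l1 l2 : List Char) (i : Nat) : pvD l1 l2 i 0 = (i : Int) * 30 := by
  cases i <;> simp [pvD]

theorem pvD_congr (l1 l2 : List Char) {i i' j j' : Nat} (hi : i = i') (hj : j = j') :
    pvD l1 l2 i j = pvD l1 l2 i' j' := by rw [hi, hj]

theorem drop_head_getD (l : List Char) (j : Nat) (c : Char) (cs : List Char)
    (h : c :: cs = l.drop j) : l.getD j ' ' = c := by
  have h0 : l[j]? = some c := by
    have := List.getElem?_drop (xs := l) (i := j) (j := 0)
    rw [← h] at this; simpa using this.symm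
  simp [List.getD_eq_getElem?_getD, h0]

theorem drop_tail (l : List Char) (j : Nat) (c : Char) (cs : List Char)
    (h : c :: cs = l.drop j) : cs = l.drop (j+1) := by
  have h1 : (l.drop j).drop 1 = l.drop (j + 1) := by rw [List.drop_drop]
  rw [← h1, ← h]; simp

theorem innerA_spec (l1 l2 : List Char) (i : Nat) :
    ∀ (cs : List Char) (j : Nat), cs = l2.drop j →
    pvInnerA (l1.getD i ' ') (pvD l1 l2 i j)
      ((List.range cs.length).map (fun t => pvD l1 l2 i (j + 1 + t))) cs (pvD l1 l2 (i+1) j)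
    = (List.range cs.length).map (fun t => pvD l1 l2 (i+1) (j + 1 + t)) := by
  intro cs
  induction cs with
  | nil => intro j _; simp [pvInnerA]
  | cons c cs ih =>
      intro j hj
      have hc : l2.getD j ' ' = c := drop_head_getD l2 j c cs hj
      have hdrop : cs = l2.drop (j+1) := drop_tail l2 j c cs hj
      have hv : min (min (pvD l1 l2 i j + get_mismatch_cost (l1.getD i ' ') c)
            (pvD l1 l2 i (j + 1) + 30)) (pvD l1 l2 (i+1) j + 30)
          = pvD l1 l2 (i+1) (j+1) := by
        conv_rhs => rw [pvD]
        rw [hc]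
      simp only [List.length_cons, List.range_succ_eq_map, List.map_cons, List.map_map,
        pvInnerA, Nat.add_zero]
      rw [hv]
      congr 1
      have e1 : (List.range cs.length).map ((fun t => pvD l1 l2 i (j + 1 + t)) ∘ Nat.succ)
          = (List.range cs.length).map (fun t => pvD l1 l2 i (j + 1 + 1 + t)) :=
        List.map_congr_left (fun t _ => by
          simp only [Function.comp_apply]; exact pvD_congr l1 l2 rfl (by omega))
      have e2 : (List.range cs.length).map ((fun t => pvD l1 l2 (i+1) (j + 1 + t)) ∘ Nat.succ)
          = (List.range cs.length).map (fun t => pvD l1 l2 (i+1) (j + 1 + 1 + t)) :=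
        List.map_congr_left (fun t _ => by
          simp only [Function.comp_apply]; exact pvD_congr l1 l2 rfl (by omega))
      rw [e1, e2]
      exact ih (j+1) hdrop

theorem stepA_spec (l1 l2 : List Char) (i : Nat) :
    pvStepA (l1.getD i ' ') ((List.range (l2.length + 1)).map (fun j => pvD l1 l2 i j)) l2
    = (List.range (l2.length + 1)).map (fun j => pvD l1 l2 (i+1) j) := by
  simp only [List.range_succ_eq_map, List.map_cons, List.map_map, pvStepA]
  have h0 : pvD l1 l2 i 0 + 30 = pvD l1 l2 (i+1) 0 := by
    rw [pvD_zero_right, pvD_zero_right]; push_cast; ring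
  rw [h0]
  congr 1
  have e1 : (List.range l2.length).map ((fun j => pvD l1 l2 i j) ∘ Nat.succ)
      = (List.range l2.length).map (fun t => pvD l1 l2 i (0 + 1 + t)) :=
    List.map_congr_left (fun t _ => by
      simp only [Function.comp_apply]; exact pvD_congr l1 l2 rfl (by omega))
  have e2 : (List.range l2.length).map ((fun j => pvD l1 l2 (i+1) j) ∘ Nat.succ)
      = (List.range l2.length).map (fun t => pvD l1 l2 (i+1) (0 + 1 + t)) :=
    List.map_congr_left (fun t _ => by
      simp only [Function.comp_apply]; exact pvD_congr l1 l2 rfl (by omega))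
  rw [e1, e2]
  exact innerA_spec l1 l2 i l2 0 (by simp)

theorem foldA_spec (l1 l2 : List Char) :
    ∀ (s : List Char) (i : Nat), s = l1.drop i →
    s.foldl (fun prev c1 => pvStepA c1 prev l2)
        ((List.range (l2.length + 1)).map (fun j => pvD l1 l2 i j))
    = (List.range (l2.length + 1)).map (fun j => pvD l1 l2 (i + s.length) j) := by
  intro s
  induction s with
  | nil => intro i _; simp
  | cons c s ih =>
      intro i hi
      have hc : l1.getD i ' ' = c := drop_head_getD l1 i c s hi
      have hdrop : s = l1.drop (i+1) := drop_tail l1 i c s hi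
      simp only [List.foldl_cons]
      rw [← hc, stepA_spec, ih (i+1) hdrop]
      exact List.map_congr_left (fun j _ => pvD_congr l1 l2 (by simp; omega) rfl)

-- B-side
theorem innerB_spec (l1 l2 : List Char) (j : Nat) :
    ∀ (chs : List Char) (i : Nat), chs = l1.drop i →
    pvInnerB (l2.getD j ' ') (pvD l1 l2 i j)
      ((List.range chs.length).map (fun t => pvD l1 l2 (i + 1 + t) j)) chs (pvD l1 l2 i (j+1))
    = (List.range chs.length).map (fun t => pvD l1 l2 (i + 1 + t) (j+1)) := by
  intro chs
  induction chs with
  | nil => intro i _; simp [pvInnerB]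
  | cons ch chs ih =>
      intro i hi
      have hc : l1.getD i ' ' = ch := drop_head_getD l1 i ch chs hi
      have hdrop : chs = l1.drop (i+1) := drop_tail l1 i ch chs hi
      have hv : min (min (pvD l1 l2 i j + get_mismatch_cost ch (l2.getD j ' '))
            (pvD l1 l2 (i + 1) j + 30)) (pvD l1 l2 i (j+1) + 30)
          = pvD l1 l2 (i+1) (j+1) := by
        conv_rhs => rw [pvD]
        rw [hc]
        omega
      simp only [List.length_cons, List.range_succ_eq_map, List.map_cons, List.map_map,
        pvInnerB, Nat.add_zero]
      rw [hv]
      congr 1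
      have e1 : (List.range chs.length).map ((fun t => pvD l1 l2 (i + 1 + t) j) ∘ Nat.succ)
          = (List.range chs.length).map (fun t => pvD l1 l2 (i + 1 + 1 + t) j) :=
        List.map_congr_left (fun t _ => by
          simp only [Function.comp_apply]; exact pvD_congr l1 l2 (by omega) rfl)
      have e2 : (List.range chs.length).map ((fun t => pvD l1 l2 (i + 1 + t) (j+1)) ∘ Nat.succ)
          = (List.range chs.length).map (fun t => pvD l1 l2 (i + 1 + 1 + t) (j+1)) :=
        List.map_congr_left (fun t _ => by
          simp only [Function.comp_apply]; exact pvD_congr l1 l2 (by omega) rfl)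
      rw [e1, e2]
      exact ih (i+1) hdrop

theorem colStep_spec (l1 l2 : List Char) (j : Nat) :
    pvColStep (l2.getD j ' ') ((List.range (l1.length + 1)).map (fun i => pvD l1 l2 i j)) l1
    = (List.range (l1.length + 1)).map (fun i => pvD l1 l2 i (j+1)) := by
  simp only [List.range_succ_eq_map, List.map_cons, List.map_map, pvColStep]
  have h0 : pvD l1 l2 0 j + 30 = pvD l1 l2 0 (j+1) := by
    rw [pvD_zero_left, pvD_zero_left]; push_cast; ring
  rw [h0]
  congr 1
  have e1 : (List.range l1.length).map ((fun i => pvD l1 l2 i j) ∘ Nat.succ)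
      = (List.range l1.length).map (fun t => pvD l1 l2 (0 + 1 + t) j) :=
    List.map_congr_left (fun t _ => by
      simp only [Function.comp_apply]; exact pvD_congr l1 l2 (by omega) rfl)
  have e2 : (List.range l1.length).map ((fun i => pvD l1 l2 i (j+1)) ∘ Nat.succ)
      = (List.range l1.length).map (fun t => pvD l1 l2 (0 + 1 + t) (j+1)) :=
    List.map_congr_left (fun t _ => by
      simp only [Function.comp_apply]; exact pvD_congr l1 l2 (by omega) rfl)
  rw [e1, e2]
  exact innerB_spec l1 l2 j l1 0 (by simp)

-- bottom cell of the mapped column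
theorem pyGetD_col (l1 l2 : List Char) (j : Nat) :
    PySem.List.pyGetD ((List.range (l1.length + 1)).map (fun i => pvD l1 l2 i j))
      (l1.length : Int) 0 = pvD l1 l2 l1.length j := by
  rw [PySem.List.pyGetD_natCast]
  rw [List.getD_eq_getElem _ _ (by simp)]
  simp

theorem foldB_spec (l1 l2 : List Char) :
    ∀ (s : List Char) (j : Nat) (out : List Int), s = l2.drop j →
    s.foldl (pvColOut l1)
      ((List.range (l1.length + 1)).map (fun i => pvD l1 l2 i j), out)
    = ((List.range (l1.length + 1)).map (fun i => pvD l1 l2 i (j + s.length)),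
       out ++ (List.range s.length).map (fun t => pvD l1 l2 l1.length (j + 1 + t))) := by
  intro s
  induction s with
  | nil => intro j out _; simp
  | cons c s ih =>
      intro j out hj
      have hc : l2.getD j ' ' = c := drop_head_getD l2 j c s hj
      have hdrop : s = l2.drop (j+1) := drop_tail l2 j c s hj
      simp only [List.foldl_cons, pvColOut]
      rw [← hc, colStep_spec l1 l2 j, pyGetD_col, ih (j+1) _ hdrop]
      rw [Prod.mk.injEq]
      refine ⟨List.map_congr_left (fun i _ => pvD_congr l1 l2 rfl (by simp; omega)), ?_⟩
      rw [List.length_cons, List.range_succ_eq_map, List.map_cons, List.map_map,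
          List.append_assoc, List.singleton_append]
      congr 1
      rw [Nat.add_zero]
      congr 1
      exact List.map_congr_left (fun t _ => by
        simp only [Function.comp_apply]; exact pvD_congr l1 l2 rfl (by omega))

theorem A_closed (seq1 seq2 : String) :
    space_efficient_score seq1 seq2
    = (List.range (seq2.toList.length + 1)).map
        (fun j => pvD seq1.toList seq2.toList seq1.toList.length j) := by
  simp only [space_efficient_score]
  have hinit : (List.range (seq2.toList.length + 1)).map (fun (j : Nat) => (j : Int) * 30)
      = (List.range (seq2.toList.length + 1)).map (fun j => pvD seq1.toList seq2.toList 0 j) :=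
    List.map_congr_left (fun j _ => by rw [pvD_zero_left])
  rw [hinit, foldA_spec seq1.toList seq2.toList seq1.toList 0 (by simp)]
  exact List.map_congr_left (fun j _ => pvD_congr _ _ (by omega) rfl)

theorem B_closed (seq1 seq2 : String) :
    space_efficient_score_alt seq1 seq2
    = (List.range (seq2.toList.length + 1)).map
        (fun j => pvD seq1.toList seq2.toList seq1.toList.length j) := by
  simp only [space_efficient_score_alt]
  have hinit : (List.range (seq1.toList.length + 1)).map (fun (i : Nat) => (i : Int) * 30)
      = (List.range (seq1.toList.length + 1)).map (fun i => pvD seq1.toList seq2.toList i 0) :=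
    List.map_congr_left (fun i _ => by rw [pvD_zero_right])
  rw [hinit, pyGetD_col, foldB_spec seq1.toList seq2.toList seq2.toList 0 _ (by simp)]
  dsimp only
  rw [List.range_succ_eq_map, List.map_cons, List.map_map, List.singleton_append]
  congr 1
  exact List.map_congr_left (fun t _ => by
    simp only [Function.comp_apply]; exact pvD_congr _ _ rfl (by omega))

-- ===== VERDICT (by name: the statement is the Claim_ definition above) =====
theorem space_efficient_score_spec : Claim_equal_space_efficient_score := by
  intro seq1 seq2 _ _
  unfold Spec_space_efficient_score
  rw [A_closed, B_closed]
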